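-- pv_equiv track=rewrite | github.com/NikoSpatscheck/T2_Entlassungsbriefe | maleyka_pdf/service.py | _keep_medical_part_only
-- ===== SOURCE A (Python) =====
-- def _keep_medical_part_only(text: str) -> str:
--     if not text:
--         return ""
--
--     medical_section_markers = [
--         "1. Diagnosen",
--         "Diagnosen",
--         "Hauptdiagnose",
--         "Anlass der Aufnahme",
--         "Aufnahmegrund",
--         "Einweisung",
--         "Relevante Anamnese",
--         "Klinischer Befund",
--         "Verlauf",
--         "Therapie",
--         "Medikation",
--     ]
--
--     earliest_pos = None
--
--     for marker in medical_section_markers: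
--         pos = text.find(marker)
--         if pos != -1:
--             if earliest_pos is None or pos < earliest_pos:
--                 earliest_pos = pos
--
--     if earliest_pos is not None:
--         return text[earliest_pos:].strip()
--
--     return text.strip()
-- ===== SOURCE B (Python) =====
-- def _keep_medical_part_only(text: str) -> str:
--     if not text:
--         return ""
--
--     markers = (
--         "1. Diagnosen",
--         "Diagnosen",
--         "Hauptdiagnose",
--         "Anlass der Aufnahme",
--         "Aufnahmegrund",
--         "Einweisung",
--         "Relevante Anamnese",
--         "Klinischer Befund",
--         "Verlauf",
--         "Therapie",
--         "Medikation",
--     )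
--
--     # single left-to-right scan: the first position where any marker starts
--     # is exactly the minimum of the per-marker find() positions
--     for i in range(len(text)):
--         if any(text.startswith(m, i) for m in markers):
--             return text[i:].strip()
--
--     return text.strip()
-- ===== Notes on version B (the rewrite author's own statement) =====
-- stated objective: alternative
-- what changed: Replaces the per-marker find() loop with a running minimum by one left-to-right scan over positions that returns at the first position where any marker starts (leftmost match = min of finds).
import Mathlib
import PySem

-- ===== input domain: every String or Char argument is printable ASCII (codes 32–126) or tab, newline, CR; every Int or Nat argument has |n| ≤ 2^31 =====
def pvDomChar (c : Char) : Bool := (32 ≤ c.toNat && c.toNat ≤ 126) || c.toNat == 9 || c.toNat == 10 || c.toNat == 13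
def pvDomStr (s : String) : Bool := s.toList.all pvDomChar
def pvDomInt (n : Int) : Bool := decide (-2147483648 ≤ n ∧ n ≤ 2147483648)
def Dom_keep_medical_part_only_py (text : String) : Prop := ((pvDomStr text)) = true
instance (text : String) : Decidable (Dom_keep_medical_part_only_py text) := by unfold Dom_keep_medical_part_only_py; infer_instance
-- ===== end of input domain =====

-- B replaces A's per-marker find() loop with a running minimum by a single
-- left-to-right positional scan that stops at the first position where any
-- marker starts (alternative decomposition; no speed claim).

-- ===== PORT A =====
def pvMarkersA : List String :=
  ["1. Diagnosen", "Diagnosen", "Hauptdiagnose", "Anlass der Aufnahme",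
   "Aufnahmegrund", "Einweisung", "Relevante Anamnese", "Klinischer Befund",
   "Verlauf", "Therapie", "Medikation"]

-- the body of A's `for marker in …` loop, as a fold step over `earliest_pos`
def pvStepA (text : String) (earliest : Option Int) (marker : String) : Option Int :=
  let pos := PySem.Str.find text marker
  if pos ≠ -1 then
    match earliest with
    | none => some pos
    | some e => if pos < e then some pos else some e
  else earliest

def keep_medical_part_only_py (text : String) : String :=
  if text = "" then ""
  else
    match pvMarkersA.foldl (pvStepA text) none with
    | some e => PySem.Str.strip (PySem.Str.slice text (some e) none)
    | none => PySem.Str.strip text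

-- ===== PORT B =====
def pvMarkersB : List String :=
  ["1. Diagnosen", "Diagnosen", "Hauptdiagnose", "Anlass der Aufnahme",
   "Aufnahmegrund", "Einweisung", "Relevante Anamnese", "Klinischer Befund",
   "Verlauf", "Therapie", "Medikation"]

-- B's `for i in range(len(text))` scan: i-th iteration sees the suffix text[i:];
-- returns the first suffix at which some marker starts (= text.startswith(m, i))
def pvScan (markers : List String) : List Char → Option (List Char)
  | [] => none
  | c :: rest =>
      if markers.any (fun m => PySem.Chars.startswith (c :: rest) m.toList) then
        some (c :: rest)
      else pvScan markers rest

def keep_medical_part_only_py_alt (text : String) : String :=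
  if text = "" then ""
  else
    match pvScan pvMarkersB text.toList with
    | some suf => String.ofList (PySem.Chars.strip suf)
    | none => PySem.Str.strip text

-- ===== PRECONDITION & SPEC =====
def Spec_keep_medical_part_only_py (text : String) (out : String) : Prop := out = keep_medical_part_only_py_alt text
instance (text : String) (out : String) : Decidable (Spec_keep_medical_part_only_py text out) := by unfold Spec_keep_medical_part_only_py; infer_instance

-- ===== CLAIM (what is proved, stated in full; the proofs are below) =====
def Claim_equal_keep_medical_part_only_py : Prop := ∀ (text : String), Dom_keep_medical_part_only_py text → Spec_keep_medical_part_only_py text (keep_medical_part_only_py text)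

-- ===== LEMMAS AND PROOFS =====

-- pvStepA with its branches exposed for case analysis
theorem pvStepA_eq (text : String) (acc : Option Int) (m : String) :
    pvStepA text acc m =
      (if PySem.Str.find text m = -1 then acc
       else match acc with
         | none => some (PySem.Str.find text m)
         | some e => if PySem.Str.find text m < e then some (PySem.Str.find text m)
                     else some e) := by
  unfold pvStepA
  by_cases h : PySem.Str.find text m = -1
  · rw [if_neg (by simpa using h), if_pos h]
  · rw [if_pos (by simpa using h), if_neg h]

theorem pvStepA_neg (text : String) (acc : Option Int) (m : String)
    (h : PySem.Str.find text m = -1) : pvStepA text acc m = acc := by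
  rw [pvStepA_eq, if_pos h]

theorem pvStepA_nil (text : String) (m : String)
    (h : ¬ PySem.Str.find text m = -1) :
    pvStepA text none m = some (PySem.Str.find text m) := by
  rw [pvStepA_eq, if_neg h]

theorem pvStepA_acc (text : String) (a : Int) (m : String)
    (h : ¬ PySem.Str.find text m = -1) :
    pvStepA text (some a) m =
      if PySem.Str.find text m < a then some (PySem.Str.find text m) else some a := by
  rw [pvStepA_eq, if_neg h]

-- A's fold returns none iff the accumulator was none and every find was -1
theorem pvStepA_foldl_none (text : String) (ms : List String) (acc : Option Int) :
    List.foldl (pvStepA text) acc ms = none ↔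
      acc = none ∧ ∀ m ∈ ms, PySem.Str.find text m = -1 := by
  induction ms generalizing acc with
  | nil => simp
  | cons m ms ih =>
    rw [List.foldl_cons, ih]
    by_cases hm : PySem.Str.find text m = -1
    · rw [pvStepA_neg text acc m hm]
      constructor
      · rintro ⟨h1, h2⟩
        refine ⟨h1, fun m' hm' => ?_⟩
        rcases List.mem_cons.mp hm' with rfl | hmem
        exacts [hm, h2 m' hmem]
      · rintro ⟨h1, h2⟩
        exact ⟨h1, fun m' hm' => h2 m' (List.mem_cons_of_mem _ hm')⟩
    · constructor
      · rintro ⟨h1, h2⟩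
        cases acc with
        | none => rw [pvStepA_nil text m hm] at h1; exact absurd h1 (by simp)
        | some a => rw [pvStepA_acc text a m hm] at h1; split at h1 <;> exact absurd h1 (by simp)
      · rintro ⟨h1, h2⟩
        exact absurd (h2 m (by simp)) hm

-- characterisation of A's fold when it returns `some e`
theorem pvStepA_foldl_some (text : String) (ms : List String) (acc : Option Int) (e : Int)
    (h : List.foldl (pvStepA text) acc ms = some e) :
    ((∃ m ∈ ms, PySem.Str.find text m = e ∧ e ≠ -1) ∨ acc = some e) ∧
      (∀ m ∈ ms, PySem.Str.find text m = -1 ∨ e ≤ PySem.Str.find text m) ∧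
      (∀ a, acc = some a → e ≤ a) := by
  induction ms generalizing acc with
  | nil =>
    simp only [List.foldl_nil] at h
    exact ⟨Or.inr h, by simp, fun a ha => by rw [h] at ha; injection ha with h'; omega⟩
  | cons m ms ih =>
    rw [List.foldl_cons] at h
    obtain ⟨h1, h2, h3⟩ := ih (pvStepA text acc m) h
    by_cases hm : PySem.Str.find text m = -1
    · rw [pvStepA_neg text acc m hm] at h1 h3
      refine ⟨?_, ?_, h3⟩
      · rcases h1 with ⟨m', hm', he⟩ | h1
        · exact Or.inl ⟨m', List.mem_cons_of_mem _ hm', he⟩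
        · exact Or.inr h1
      · intro m' hm'
        rcases List.mem_cons.mp hm' with rfl | hmem
        · exact Or.inl hm
        · exact h2 m' hmem
    · -- the step stores some value v ≤ find m
      have hsome : ∃ v, pvStepA text acc m = some v := by
        cases acc with
        | none => exact ⟨_, pvStepA_nil text m hm⟩
        | some a =>
          refine ⟨if PySem.Str.find text m < a then PySem.Str.find text m else a, ?_⟩
          rw [pvStepA_acc text a m hm]
          exact (apply_ite some _ _ _).symm
      obtain ⟨v, hv⟩ := hsome
      have hstep : (v = PySem.Str.find text m ∨ acc = some v) ∧
          v ≤ PySem.Str.find text m ∧ (∀ a, acc = some a → v ≤ a) := by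
        cases acc with
        | none =>
          rw [pvStepA_nil text m hm] at hv
          injection hv with hv; subst hv
          exact ⟨Or.inl rfl, le_refl _, by simp⟩
        | some a =>
          rw [pvStepA_acc text a m hm] at hv
          by_cases hlt : PySem.Str.find text m < a
          · rw [if_pos hlt] at hv
            injection hv with hv; subst hv
            exact ⟨Or.inl rfl, le_refl _, fun a' ha' => by injection ha' with ha'; omega⟩
          · rw [if_neg hlt] at hv
            injection hv with hv; subst hv
            exact ⟨Or.inr rfl, by omega, fun a' ha' => by injection ha' with ha'; omega⟩
      obtain ⟨hv1, hv2, hv3⟩ := hstep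
      have hev : e ≤ v := h3 v hv
      refine ⟨?_, ?_, ?_⟩
      · rcases h1 with ⟨m', hm', he⟩ | h1
        · exact Or.inl ⟨m', List.mem_cons_of_mem _ hm', he⟩
        · rw [hv] at h1
          injection h1 with h1
          subst h1
          rcases hv1 with rfl | hacc
          · exact Or.inl ⟨m, List.mem_cons_self, rfl, hm⟩
          · exact Or.inr hacc
      · intro m' hm'
        rcases List.mem_cons.mp hm' with rfl | hmem
        · exact Or.inr (le_trans hev hv2)
        · exact h2 m' hmem
      · intro a ha
        exact le_trans hev (hv3 a ha)

-- a prefix of any drop is an infix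
theorem pv_prefix_drop_infix {m l : List Char} {j : Nat} (h : m <+: l.drop j) :
    m <:+: l :=
  h.isInfix.trans (List.drop_suffix j l).isInfix

-- B's scan returns none when no marker occurs anywhere
theorem pvScan_none (ms : List String) (l : List Char)
    (h : ∀ m ∈ ms, ¬ m.toList <:+: l) : pvScan ms l = none := by
  induction l with
  | nil => rfl
  | cons c rest ih =>
    have hany : (ms.any (fun m => PySem.Chars.startswith (c :: rest) m.toList)) = false := by
      simp only [List.any_eq_false]
      intro m hm hsw
      exact h m hm ((PySem.Chars.startswith_iff _ _).mp hsw).isInfix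
    rw [pvScan, hany, if_neg (by simp)]
    exact ih (fun m hm hinf => h m hm (List.infix_cons hinf))

-- B's scan returns the suffix at the least position where some marker starts
theorem pvScan_some (ms : List String) (l : List Char)
    (hne : ∀ m ∈ ms, m.toList ≠ []) (i : Nat)
    (hi : ∃ m ∈ ms, m.toList <+: l.drop i)
    (hmin : ∀ j < i, ∀ m ∈ ms, ¬ m.toList <+: l.drop j) :
    pvScan ms l = some (l.drop i) := by
  induction l generalizing i with
  | nil =>
    obtain ⟨m, hm, hpre⟩ := hi
    rw [List.drop_nil] at hpre
    exact absurd (List.prefix_nil.mp hpre) (hne m hm)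
  | cons c rest ih =>
    cases i with
    | zero =>
      obtain ⟨m, hm, hpre⟩ := hi
      have hany : (ms.any (fun m => PySem.Chars.startswith (c :: rest) m.toList)) = true := by
        simp only [List.any_eq_true]
        exact ⟨m, hm, (PySem.Chars.startswith_iff _ _).mpr (by simpa using hpre)⟩
      rw [pvScan, hany, if_pos rfl, List.drop_zero]
    | succ i' =>
      have hany : (ms.any (fun m => PySem.Chars.startswith (c :: rest) m.toList)) = false := by
        simp only [List.any_eq_false]
        intro m hm hsw
        exact hmin 0 (Nat.succ_pos _) m hm
          (by simpa using (PySem.Chars.startswith_iff _ _).mp hsw)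
      rw [pvScan, hany, if_neg (by simp), List.drop_succ_cons]
      refine ih i' ?_ ?_
      · obtain ⟨m, hm, hpre⟩ := hi
        exact ⟨m, hm, by simpa [List.drop_succ_cons] using hpre⟩
      · intro j hj m hm
        have := hmin (j + 1) (by omega) m hm
        simpa [List.drop_succ_cons] using this

theorem pvMarkers_eq : pvMarkersB = pvMarkersA := rfl

-- ===== VERDICT (by name: the statement is the Claim_ definition above) =====
theorem keep_medical_part_only_py_spec : Claim_equal_keep_medical_part_only_py := by
  intro text _
  show keep_medical_part_only_py text = keep_medical_part_only_py_alt text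
  unfold keep_medical_part_only_py keep_medical_part_only_py_alt
  by_cases htxt : text = ""
  · rw [if_pos htxt, if_pos htxt]
  · rw [if_neg htxt, if_neg htxt, pvMarkers_eq]
    rcases hF : pvMarkersA.foldl (pvStepA text) none with _ | e
    · -- no marker found
      have hall := ((pvStepA_foldl_none text pvMarkersA none).mp hF).2
      have hscan : pvScan pvMarkersA text.toList = none := by
        refine pvScan_none _ _ (fun m hm => ?_)
        have := hall m hm
        rw [PySem.Str.find_eq] at this
        exact (PySem.Chars.find_eq_neg_one_iff _ _).mp this
      rw [hscan]
    · -- earliest position e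
      obtain ⟨h1, h2, -⟩ := pvStepA_foldl_some text pvMarkersA none e hF
      rcases h1 with ⟨m, hm, he, hne1⟩ | h1
      swap
      · exact absurd h1 (by simp)
      have he0 : 0 ≤ e := by
        have := PySem.Chars.neg_one_le_find text.toList m.toList
        rw [PySem.Str.find_eq] at he
        omega
      have hfind : PySem.Chars.find text.toList m.toList = e := by
        rw [← PySem.Str.find_eq]; exact he
      have hspec := PySem.Chars.find_spec (s := text.toList) (sub := m.toList)
        (by rw [hfind]; exact he0)
      rw [hfind] at hspec
      have hscan : pvScan pvMarkersA text.toList = some (text.toList.drop e.toNat) := by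
        refine pvScan_some _ _ (by decide) e.toNat ⟨m, hm, hspec.1⟩ ?_
        intro j hj m' hm'
        rcases h2 m' hm' with hneg | hle
        · rw [PySem.Str.find_eq] at hneg
          intro hpre
          exact (PySem.Chars.find_eq_neg_one_iff _ _).mp hneg (pv_prefix_drop_infix hpre)
        · have he0' : 0 ≤ PySem.Str.find text m' := by omega
          have hspec' := PySem.Chars.find_spec (s := text.toList) (sub := m'.toList)
            (by rw [← PySem.Str.find_eq]; exact he0')
          refine hspec'.2 j ?_
          rw [← PySem.Str.find_eq]
          omega
      rw [hscan]
      have htl : (PySem.Str.strip (PySem.Str.slice text (some e) none)).toList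
          = PySem.Chars.strip (text.toList.drop e.toNat) := by
        rw [PySem.Str.toList_strip, PySem.Str.toList_slice,
          PySem.Chars.slice_eq_listSlice, PySem.List.slice_from _ he0]
      calc PySem.Str.strip (PySem.Str.slice text (some e) none)
          = String.ofList (PySem.Str.strip (PySem.Str.slice text (some e) none)).toList :=
            String.ofList_toList.symm
        _ = String.ofList (PySem.Chars.strip (text.toList.drop e.toNat)) := by rw [htl]
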